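-- pv_equiv track=rewrite | github.com/elanbarenholtz/morphosyntax-experiment | generate_locked_stimuli.py | cue_deletion
-- ===== SOURCE A (Python) =====
-- def cue_deletion(sentence: str, cue_word: str, replacement: str = 'ke') -> str:
--     """
--     CUE_DELETED: Replace the critical cue with a nonce function word.
--
--     Tests whether the specific cue is necessary for constraint.
--     """
--     words = sentence.split()
--     result = []
--
--     cue_found = False
--     for word in words:
--         word_clean = word.lower().strip('.,!?;:')
--         if word_clean == cue_word.lower() and not cue_found:
--             result.append(replacement)
--             cue_found = True  # Only replace first occurrence
--         else:
--             result.append(word)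
--
--     return ' '.join(result)
-- ===== SOURCE B (Python) =====
-- def cue_deletion(sentence: str, cue_word: str, replacement: str = 'ke') -> str:
--     """Locate the first cue occurrence up front, then splice the replacement in."""
--     words = sentence.split()
--     target = cue_word.lower()
--     i = next((i for i, w in enumerate(words)
--               if w.lower().strip('.,!?;:') == target), None)
--     if i is None:
--         return ' '.join(words)
--     return ' '.join(words[:i] + [replacement] + words[i + 1:])
-- ===== Notes on version B (the rewrite author's own statement) =====
-- stated objective: simpler
-- what changed: B separates locating the first cue (next over an enumerate generator, None if absent) from building the output by list splicing, eliminating A's boolean flag and its append-every-word accumulator loop.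
import Mathlib
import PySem

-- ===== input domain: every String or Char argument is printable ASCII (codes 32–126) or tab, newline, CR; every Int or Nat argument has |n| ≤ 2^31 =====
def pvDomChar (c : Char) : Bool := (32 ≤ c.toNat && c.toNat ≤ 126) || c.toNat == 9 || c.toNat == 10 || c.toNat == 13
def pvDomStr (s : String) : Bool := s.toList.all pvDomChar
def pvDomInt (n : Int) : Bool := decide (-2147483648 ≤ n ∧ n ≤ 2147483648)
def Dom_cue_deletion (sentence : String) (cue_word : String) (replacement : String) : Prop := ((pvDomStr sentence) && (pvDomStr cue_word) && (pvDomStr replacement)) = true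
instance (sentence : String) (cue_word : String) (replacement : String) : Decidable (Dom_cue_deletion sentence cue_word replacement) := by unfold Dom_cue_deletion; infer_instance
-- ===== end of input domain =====

-- B separates finding the first cue index from splicing the replacement in (simpler decomposition, no flag/accumulator loop).

-- ===== PORT A =====
-- A's loop body: clean the word, replace it if it equals the lowered cue and the flag is still unset
def cueStepA (cue_word replacement : String) (st : List String × Bool) (word : String) : List String × Bool :=
  let word_clean := PySem.Str.stripChars (PySem.Str.lower word) ".,!?;:"
  if word_clean == PySem.Str.lower cue_word && !st.2 then
    (st.1 ++ [replacement], true)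
  else
    (st.1 ++ [word], st.2)

def cue_deletion (sentence : String) (cue_word : String) (replacement : String) : String :=
  let words := PySem.Str.split₀ sentence
  let st := words.foldl (cueStepA cue_word replacement) ([], false)
  PySem.Str.join " " st.1

-- ===== PORT B =====
def cue_deletion_alt (sentence : String) (cue_word : String) (replacement : String) : String :=
  let words := PySem.Str.split₀ sentence
  let target := PySem.Str.lower cue_word
  match words.findIdx? (fun w => PySem.Str.stripChars (PySem.Str.lower w) ".,!?;:" == target) with
  | none => PySem.Str.join " " words
  | some i => PySem.Str.join " " (words.take i ++ [replacement] ++ words.drop (i + 1))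

-- ===== PRECONDITION & SPEC =====
def Spec_cue_deletion (sentence : String) (cue_word : String) (replacement : String) (out : String) : Prop := out = cue_deletion_alt sentence cue_word replacement
instance (sentence : String) (cue_word : String) (replacement : String) (out : String) : Decidable (Spec_cue_deletion sentence cue_word replacement out) := by unfold Spec_cue_deletion; infer_instance

-- ===== CLAIM (what is proved, stated in full; the proofs are below) =====
def Claim_equal_cue_deletion : Prop := ∀ (sentence : String) (cue_word : String) (replacement : String), Dom_cue_deletion sentence cue_word replacement → Spec_cue_deletion sentence cue_word replacement (cue_deletion sentence cue_word replacement)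

-- ===== LEMMAS AND PROOFS =====

-- once the cue has been found, A's loop just appends the remaining words
theorem pv_loop_true (cue replacement : String) :
    ∀ (words : List String) (acc : List String),
      words.foldl (cueStepA cue replacement) (acc, true) = (acc ++ words, true) := by
  intro words
  induction words with
  | nil => intro acc; simp
  | cons w ws ih =>
      intro acc
      rw [List.foldl_cons]
      simp only [cueStepA, Bool.not_true, Bool.and_false, Bool.false_eq_true, if_false]
      rw [ih]
      simp

-- before the cue has been found, A's loop computes the splice that B builds directly
theorem pv_loop_false (cue replacement : String) :
    ∀ (words : List String) (acc : List String),
      (words.foldl (cueStepA cue replacement) (acc, false)).1 =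
      acc ++ (match words.findIdx? (fun w => PySem.Str.stripChars (PySem.Str.lower w) ".,!?;:" == PySem.Str.lower cue) with
        | none => words
        | some i => words.take i ++ [replacement] ++ words.drop (i + 1)) := by
  intro words
  induction words with
  | nil => intro acc; simp
  | cons w ws ih =>
      intro acc
      rw [List.foldl_cons, List.findIdx?_cons]
      by_cases h : (PySem.Str.stripChars (PySem.Str.lower w) ".,!?;:" == PySem.Str.lower cue) = true
      · simp only [cueStepA, h, Bool.not_false, Bool.and_true, if_true]
        rw [pv_loop_true]
        simp
      · simp only [cueStepA, h, Bool.not_false, Bool.and_true, Bool.false_eq_true, if_false]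
        rw [ih (acc ++ [w])]
        cases hfi : ws.findIdx? (fun w => PySem.Str.stripChars (PySem.Str.lower w) ".,!?;:" == PySem.Str.lower cue) with
        | none => simp
        | some i => simp [List.take_succ_cons, List.drop_succ_cons]

-- ===== VERDICT (by name: the statement is the Claim_ definition above) =====
theorem cue_deletion_spec : Claim_equal_cue_deletion := by
  intro sentence cue_word replacement _
  unfold Spec_cue_deletion cue_deletion cue_deletion_alt
  dsimp only
  rw [pv_loop_false cue_word replacement (PySem.Str.split₀ sentence) []]
  cases hfi : (PySem.Str.split₀ sentence).findIdx?
      (fun w => PySem.Str.stripChars (PySem.Str.lower w) ".,!?;:" == PySem.Str.lower cue_word) with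
  | none => simp
  | some i => simp
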